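-- pv_equiv track=rewrite | github.com/welli7ngton/Python | Funções/Recursividade/exercicio8.py | todos_imparesQ
-- ===== SOURCE A (Python) =====
-- def todos_imparesQ(lista, pos=0):
--     if pos == len(lista):
--         return True
--     if lista[pos] %2 != 0:
--         pos += 1
--         return todos_imparesQ(lista,pos)
--     else:
--         return False
-- ===== SOURCE B (Python) =====
-- def todos_imparesQ(lista, pos=0):
--     return all(lista[i] % 2 != 0 for i in range(pos, len(lista)))
-- ===== Notes on version B (the rewrite author's own statement) =====
-- stated objective: simpler
-- what changed: Replaces A's tail recursion (with an explicit pos parameter and early returns) by a single all() over the index range range(pos, len(lista)), scanning the same indices.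
-- crash fix: When pos > len(lista) (in particular any pos > 0 on an empty list) A raises IndexError at lista[pos]; B's index range is empty there and it returns True. — e.g. on todos_imparesQ([3], 2): A raises IndexError, B returns true
import Mathlib
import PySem

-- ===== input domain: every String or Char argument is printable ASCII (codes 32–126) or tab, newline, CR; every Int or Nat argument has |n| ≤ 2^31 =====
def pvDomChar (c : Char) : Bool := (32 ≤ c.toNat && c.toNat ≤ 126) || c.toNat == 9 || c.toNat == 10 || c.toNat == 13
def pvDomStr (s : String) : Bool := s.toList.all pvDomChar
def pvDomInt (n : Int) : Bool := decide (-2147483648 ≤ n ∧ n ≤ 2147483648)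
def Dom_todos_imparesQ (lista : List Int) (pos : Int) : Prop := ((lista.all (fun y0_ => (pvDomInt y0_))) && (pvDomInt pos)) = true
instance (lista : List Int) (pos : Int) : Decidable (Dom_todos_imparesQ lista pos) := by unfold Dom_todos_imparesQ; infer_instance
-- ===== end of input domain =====

-- B replaces A's tail recursion by a single all() over the index range range(pos, len(lista))
-- (same scanned indices, including Python's negative-index wraparound); objective: simpler.

-- ===== PORT A =====
-- recursive port of A; the 'none' branch is Python's IndexError (excluded by Pre_)
def todos_imparesQ (lista : List Int) (pos : Int) : Bool :=
  if pos = (lista.length : Int) then true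
  else
    match h : PySem.List.pyGet? lista pos with
    | none => false
    | some x =>
      if PySem.Int.mod x 2 ≠ 0 then todos_imparesQ lista (pos + 1) else false
termination_by ((lista.length : Int) - pos).toNat
decreasing_by
  have hin : PySem.Raise.InRange lista.length pos := by
    by_contra hc
    rw [← PySem.List.pyGet?_eq_none_iff] at hc
    simp [hc] at h
  obtain ⟨_, h2⟩ := hin
  omega

-- ===== PORT B =====
def todos_imparesQ_alt (lista : List Int) (pos : Int) : Bool :=
  (PySem.List.pyRange pos (lista.length : Int) 1).all
    (fun i => PySem.Int.mod (PySem.List.pyGetD lista i 0) 2 != 0)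

-- ===== PRECONDITION & SPEC =====
-- Pre_ excludes exactly the inputs where A's lista[pos] raises IndexError (pos > len or pos < -len)
def Pre_todos_imparesQ (lista : List Int) (pos : Int) : Prop :=
  -(lista.length : Int) ≤ pos ∧ pos ≤ (lista.length : Int)
instance (lista : List Int) (pos : Int) : Decidable (Pre_todos_imparesQ lista pos) := by unfold Pre_todos_imparesQ; infer_instance
def pvWitness_todos_imparesQ : List Int × Int := ([3, 5, 2], 0)

-- A raises IndexError when pos > len(lista); B's empty index range returns True there.
def Raises_todos_imparesQ (lista : List Int) (pos : Int) : Prop := (lista.length : Int) < pos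
instance (lista : List Int) (pos : Int) : Decidable (Raises_todos_imparesQ lista pos) := by unfold Raises_todos_imparesQ; infer_instance
def pvRaiseWitness_todos_imparesQ : List Int × Int := ([3], 2)
def pvRaiseWitnessOut_todos_imparesQ : Bool := true

def Spec_todos_imparesQ (lista : List Int) (pos : Int) (out : Bool) : Prop := out = todos_imparesQ_alt lista pos
instance (lista : List Int) (pos : Int) (out : Bool) : Decidable (Spec_todos_imparesQ lista pos out) := by unfold Spec_todos_imparesQ; infer_instance

-- ===== CLAIM (what is proved, stated in full; the proofs are below) =====
def Claim_equal_todos_imparesQ : Prop := ∀ (lista : List Int) (pos : Int), Dom_todos_imparesQ lista pos → Pre_todos_imparesQ lista pos → Spec_todos_imparesQ lista pos (todos_imparesQ lista pos)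
def Claim_raises_todos_imparesQ : Prop := (∀ (lista : List Int) (pos : Int), Dom_todos_imparesQ lista pos → Raises_todos_imparesQ lista pos → ¬ Pre_todos_imparesQ lista pos) ∧ (Dom_todos_imparesQ (pvRaiseWitness_todos_imparesQ.1) (pvRaiseWitness_todos_imparesQ.2) ∧ Raises_todos_imparesQ (pvRaiseWitness_todos_imparesQ.1) (pvRaiseWitness_todos_imparesQ.2) ∧ todos_imparesQ_alt (pvRaiseWitness_todos_imparesQ.1) (pvRaiseWitness_todos_imparesQ.2) = pvRaiseWitnessOut_todos_imparesQ)

-- ===== LEMMAS AND PROOFS =====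

theorem pyGetD_eq_getD_pyGet? (xs : List Int) (i d : Int) :
    PySem.List.pyGetD xs i d = (PySem.List.pyGet? xs i).getD d := by
  simp [PySem.List.pyGetD, PySem.List.pyGet?]

-- main invariant: on the in-range segment the recursion equals the all() over range(pos, len)
theorem todos_imparesQ_eq_alt (lista : List Int) :
    ∀ (n : Nat) (pos : Int), -(lista.length : Int) ≤ pos → pos ≤ (lista.length : Int) →
      ((lista.length : Int) - pos).toNat = n →
      todos_imparesQ lista pos = todos_imparesQ_alt lista pos := by
  intro n
  induction n with
  | zero =>
    intro pos _ h2 h3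
    have hpl : pos = (lista.length : Int) := by omega
    rw [todos_imparesQ, todos_imparesQ_alt, if_pos hpl, hpl,
      PySem.List.pyRange_one_eq_nil (le_refl _)]
    rfl
  | succ n ih =>
    intro pos h1 h2 h3
    have hlt : pos < (lista.length : Int) := by omega
    have hin : PySem.Raise.InRange lista.length pos := ⟨h1, hlt⟩
    obtain ⟨x, hx⟩ : ∃ x, PySem.List.pyGet? lista pos = some x := by
      rcases hq : PySem.List.pyGet? lista pos with _ | x
      · exact absurd ((PySem.List.pyGet?_eq_none_iff lista pos).mp hq) (not_not_intro hin)
      · exact ⟨x, rfl⟩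
    rw [todos_imparesQ, if_neg (by omega)]
    rw [todos_imparesQ_alt, PySem.List.pyRange_one_cons hlt, List.all_cons,
      pyGetD_eq_getD_pyGet?, hx]
    split
    · next heq => cases heq
    · next y heq =>
      injection heq with heq'
      subst heq'
      by_cases hodd : PySem.Int.mod x 2 ≠ 0
      · rw [if_pos hodd, ih (pos + 1) (by omega) (by omega) (by omega)]
        have hb : (PySem.Int.mod x 2 != 0) = true := by simpa using hodd
        rw [Option.getD_some, hb, Bool.true_and, todos_imparesQ_alt]
      · rw [if_neg hodd]
        simp at hodd
        simp [hodd]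

-- ===== VERDICT (by name: the statement is the Claim_ definition above) =====
theorem todos_imparesQ_spec : Claim_equal_todos_imparesQ := by
  intro lista pos _ hpre
  exact todos_imparesQ_eq_alt lista ((lista.length : Int) - pos).toNat pos hpre.1 hpre.2 rfl

theorem todos_imparesQ_raises : Claim_raises_todos_imparesQ := by
  unfold Claim_raises_todos_imparesQ
  exact ⟨fun lista pos _ hr hpre => absurd hpre.2 (by unfold Raises_todos_imparesQ at hr; omega),
    by decide⟩

-- self-check: the raise witness (pos = 2 on a one-element list) is inside Raises_ and B returns True there
theorem todos_imparesQ_raise_witness_ok :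
    Raises_todos_imparesQ (pvRaiseWitness_todos_imparesQ.1) (pvRaiseWitness_todos_imparesQ.2) :=
  todos_imparesQ_raises.2.2.1
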